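-- pv_equiv track=rewrite | github.com/Ines-Mercu/Find-the-missing-letter | Simple Maths Test.py | number_property
-- ===== SOURCE A (Python) =====
-- import math
--
-- def number_property(n):
--     answer = []
--     if n < 2:
--         answer.append(False)
--     else:
--         for i in range(2,int(math.isqrt(n)+1)):
--             if n % i == 0:
--                 answer.append(False)
--                 break
--     if len(answer) == 0:
--         answer.append(True)
--     if n % 2 == 0:
--         answer.append(True)
--     else:
--         answer.append(False)
--
--     if n % 10 == 0:
--         answer.append(True)
--     else:
--         answer.append(False)
--
--     return answer
-- ===== SOURCE B (Python) =====
-- import math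
--
-- def number_property(n):
--     if n < 2:
--         is_prime = False
--     else:
--         r = math.isqrt(n)
--         sieve = [True] * (r + 1)
--         for p in range(2, r + 1):
--             if sieve[p]:
--                 for m in range(p * p, r + 1, p):
--                     sieve[m] = False
--         primes = [p for p in range(2, r + 1) if sieve[p]]
--         is_prime = all(n % p != 0 for p in primes)
--     return [is_prime, n % 2 == 0, n % 10 == 0]
-- ===== Notes on version B (the rewrite author's own statement) =====
-- stated objective: alternative
-- what changed: Instead of trial-dividing n by every integer up to isqrt(n), B first builds a Sieve of Eratosthenes boolean array up to isqrt(n) to enumerate the primes in that range and then tests divisibility of n only against those sieved primes; the even and divisible-by-ten flags are unchanged.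
import Mathlib
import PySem

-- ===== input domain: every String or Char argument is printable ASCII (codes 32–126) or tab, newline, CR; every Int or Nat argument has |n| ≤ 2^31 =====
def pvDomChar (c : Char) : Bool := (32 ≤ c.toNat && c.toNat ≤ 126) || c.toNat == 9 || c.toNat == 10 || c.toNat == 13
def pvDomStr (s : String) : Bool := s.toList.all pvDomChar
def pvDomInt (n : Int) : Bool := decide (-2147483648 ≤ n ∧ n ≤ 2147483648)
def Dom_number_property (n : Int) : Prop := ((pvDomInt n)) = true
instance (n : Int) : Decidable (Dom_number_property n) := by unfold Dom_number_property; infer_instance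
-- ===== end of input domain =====

-- B replaces A's trial division of n by every integer in 2..isqrt(n) with a Sieve of
-- Eratosthenes up to isqrt(n) followed by divisibility tests against the sieved primes
-- only; the even and divisible-by-10 flags are computed the same way. Objective: alternative.

-- ===== PORT A =====
-- A's for-loop over range(2, isqrt(n)+1) with an early break appending [False].
def aTrial (n : Int) (i stop : Nat) : List Bool :=
  if _h : i < stop then
    if n % (i : Int) == 0 then [false] else aTrial n (i + 1) stop
  else []
termination_by stop - i

def number_property (n : Int) : List Bool :=
  let answer : List Bool :=
    if n < 2 then [false]
    else aTrial n 2 (n.toNat.sqrt + 1)     -- math.isqrt(n) = Nat.sqrt n.toNat (n ≥ 2 here)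
  let answer := if answer.length == 0 then answer ++ [true] else answer
  let answer := answer ++ [if n % 2 == 0 then true else false]
  answer ++ [if n % 10 == 0 then true else false]

-- ===== PORT B =====
-- the sieve array of Source B: start all-True of size r+1, for p in range(2, r+1) if sieve[p]
-- then mark False every m in range(p*p, r+1, p).  (Python list indices are always in
-- range here, so getD/setIfInBounds are exact.)
def sieveArr (r : Nat) : Array Bool :=
  (PySem.List.pyRange 2 ((r : Int) + 1) 1).foldl
    (fun s p =>
      let isp := s.getD p.toNat true    -- read sieve[p] first (keeps the array linear)
      if isp then
        (PySem.List.pyRange (p * p) ((r : Int) + 1) p).foldl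
          (fun s m => s.setIfInBounds m.toNat false) s
      else s)
    (Array.replicate (r + 1) true)

def number_property_alt (n : Int) : List Bool :=
  let isPrime : Bool :=
    if n < 2 then false
    else
      let r := n.toNat.sqrt
      let sieve := sieveArr r
      let primes := (PySem.List.pyRange 2 ((r : Int) + 1) 1).filter
        (fun p => sieve.getD p.toNat true)
      primes.all (fun p => n % p != 0)
  [isPrime, n % 2 == 0, n % 10 == 0]

-- ===== PRECONDITION & SPEC =====
def Spec_number_property (n : Int) (out : List Bool) : Prop := out = number_property_alt n
instance (n : Int) (out : List Bool) : Decidable (Spec_number_property n out) := by unfold Spec_number_property; infer_instance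

-- ===== CLAIM (what is proved, stated in full; the proofs are below) =====
def Claim_equal_number_property : Prop := ∀ (n : Int), Dom_number_property n → Spec_number_property n (number_property n)

-- ===== LEMMAS AND PROOFS =====

theorem aTrial_cases (n : Int) (s : Nat) : ∀ i, aTrial n i s = [] ∨ aTrial n i s = [false] := by
  intro i
  induction i using aTrial.induct (n := n) (stop := s) with
  | case1 i h hdvd => right; rw [aTrial, dif_pos h, if_pos hdvd]
  | case2 i h hdvd ih => rw [aTrial, dif_pos h, if_neg hdvd]; exact ih
  | case3 i h => left; rw [aTrial, dif_neg h]

theorem aTrial_eq_nil_iff (n : Int) (s : Nat) :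
    ∀ i, (aTrial n i s = [] ↔ ∀ j, i ≤ j → j < s → ¬ n % (j : Int) = 0) := by
  intro i
  induction i using aTrial.induct (n := n) (stop := s) with
  | case1 i h hdvd =>
      rw [aTrial, dif_pos h, if_pos hdvd]
      constructor
      · intro hc; cases hc
      · intro hall; exact absurd (by simpa using hdvd) (hall i le_rfl h)
  | case2 i h hdvd ih =>
      rw [aTrial, dif_pos h, if_neg hdvd, ih]
      constructor
      · intro hall j hij hjs
        rcases Nat.eq_or_lt_of_le hij with rfl | hlt
        · simpa using hdvd
        · exact hall j hlt hjs
      · intro hall j hij hjs; exact hall j (Nat.le_of_succ_le hij) hjs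
  | case3 i h =>
      rw [aTrial, dif_neg h]
      constructor
      · intro _ j hij hjs; omega
      · intro _; rfl

-- Int mod and Nat mod agree for a nonnegative dividend
theorem int_mod_toNat (n : Int) (hn : 0 ≤ n) (j : Nat) :
    n % (j : Int) = ((n.toNat % j : Nat) : Int) := by
  conv_lhs => rw [← Int.toNat_of_nonneg hn]
  exact_mod_cast (Int.natCast_mod n.toNat j)

-- "j is a product of two factors ≥ 2" (what a marked sieve index looks like)
def CompShape (j : Nat) : Prop := ∃ a b : Nat, 2 ≤ a ∧ 2 ≤ b ∧ j = a * b

theorem compShape_not_prime {j : Nat} (h : CompShape j) : ¬ Nat.Prime j := by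
  rcases h with ⟨a, b, ha, hb, rfl⟩
  exact Nat.not_prime_mul (by omega) (by omega)

-- setIfInBounds can only newly falsify the written index
theorem getD_set_false {s : Array Bool} {i j : Nat}
    (h : (s.setIfInBounds i false).getD j true = false) :
    s.getD j true = false ∨ j = i := by
  rw [Array.getD_eq_getD_getElem?, Array.getElem?_setIfInBounds] at h
  rw [Array.getD_eq_getD_getElem?]
  by_cases hij : i = j
  · right; omega
  · left; rw [if_neg hij] at h; exact h

-- a fold of marking writes preserves "every False index has shape a*b"
theorem inner_inv (ms : List Int) (P : Nat → Prop)
    (hms : ∀ m ∈ ms, P m.toNat) :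
    ∀ (s : Array Bool), (∀ j, s.getD j true = false → P j) →
      ∀ j, (ms.foldl (fun s m => s.setIfInBounds m.toNat false) s).getD j true = false → P j := by
  induction ms with
  | nil => intro s hs j h; exact hs j h
  | cons m ms ih =>
      intro s hs j h
      refine ih (fun m hm => hms m (List.mem_cons_of_mem _ hm)) _ ?_ j h
      intro j' hj'
      rcases getD_set_false hj' with hold | rfl
      · exact hs j' hold
      · exact hms m (List.mem_cons_self)

-- every index marked by the inner range(p*p, r+1, p) has shape a*b with a,b ≥ 2
theorem inner_marks_comp {p : Int} (hp : 2 ≤ p) (r : Nat) :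
    ∀ m ∈ PySem.List.pyRange (p * p) ((r : Int) + 1) p, CompShape m.toNat := by
  intro m hm
  rw [PySem.List.mem_pyRange_iff_of_pos (by omega)] at hm
  obtain ⟨h1, h2, c, hc⟩ := hm
  -- m = p * (p + c)
  have hm_eq : m = p * (p + c) := by ring_nf; ring_nf at hc; omega
  have hc0 : 0 ≤ c := by nlinarith
  refine ⟨p.toNat, (p + c).toNat, by omega, by omega, ?_⟩
  rw [hm_eq, Int.toNat_mul (by omega) (by omega)]

-- sieve soundness: an index set to False is composite-shaped
theorem outer_inv (r : Nat) (ps : List Int) (hps : ∀ p ∈ ps, 2 ≤ p) :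
    ∀ (s : Array Bool), (∀ j, s.getD j true = false → CompShape j) →
      ∀ j, (ps.foldl (fun s p =>
        if s.getD p.toNat true then
          (PySem.List.pyRange (p * p) ((r : Int) + 1) p).foldl
            (fun s m => s.setIfInBounds m.toNat false) s
        else s) s).getD j true = false → CompShape j := by
  induction ps with
  | nil => intro s hs; exact hs
  | cons p ps ih =>
      intro s hs
      simp only [List.foldl_cons]
      have hp2 : (2 : Int) ≤ p := hps p List.mem_cons_self
      have hps' : ∀ q ∈ ps, (2 : Int) ≤ q := fun q hq => hps q (List.mem_cons_of_mem _ hq)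
      by_cases hb : s.getD p.toNat true = true
      · rw [if_pos hb]
        exact ih hps' _ (inner_inv _ CompShape (inner_marks_comp hp2 r) s hs)
      · rw [if_neg (by simpa using hb)]; exact ih hps' s hs

theorem sieve_sound (r : Nat) : ∀ j, (sieveArr r).getD j true = false → CompShape j := by
  unfold sieveArr
  refine outer_inv r _ (fun p hp => (PySem.List.mem_pyRange_one.mp hp).1) _ ?_
  intro j hj
  rw [Array.getD_eq_getD_getElem?, Array.getElem?_replicate] at hj
  by_cases h : j < r + 1
  · rw [if_pos h] at hj; cases hj
  · rw [if_neg h] at hj; cases hj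

-- B's prime flag agrees with A's trial-division outcome for n ≥ 2
theorem flag_eq (n : Int) (hn : 2 ≤ n) :
    ((PySem.List.pyRange 2 ((n.toNat.sqrt : Int) + 1) 1).filter
        (fun p => (sieveArr n.toNat.sqrt).getD p.toNat true)).all
        (fun p => n % p != 0) = true
      ↔ aTrial n 2 (n.toNat.sqrt + 1) = [] := by
  have h0 : (0 : Int) ≤ n := by omega
  rw [List.all_eq_true, aTrial_eq_nil_iff]
  constructor
  · -- no sieved prime divides n → no j in [2, isqrt] divides n
    intro hall j h2j hjs hmod
    -- n.toNat is then composite with minFac ≤ isqrt; but first: j itself gives compositeness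
    have hjn : (j : Int) ≤ n.toNat.sqrt := by exact_mod_cast (by omega : j ≤ n.toNat.sqrt)
    -- use q = minFac n.toNat
    have hjdvd : j ∣ n.toNat := by
      rw [int_mod_toNat n h0 j] at hmod
      exact Nat.dvd_of_mod_eq_zero (by exact_mod_cast hmod)
    have hnp : ¬ Nat.Prime n.toNat := by
      intro hp
      rcases hp.eq_one_or_self_of_dvd j hjdvd with h1 | h1
      · omega
      · have hsq : j * j ≤ n.toNat := Nat.le_sqrt.mp (by omega)
        rw [h1] at hsq
        nlinarith [hp.two_le]
    set q := n.toNat.minFac with hq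
    have hqp : Nat.Prime q := Nat.minFac_prime (by omega)
    have hqd : q ∣ n.toNat := Nat.minFac_dvd _
    have hqsq : q * q ≤ n.toNat := by
      have := Nat.minFac_sq_le_self (by omega : 0 < n.toNat) hnp
      simpa [pow_two] using this
    have hq2 : 2 ≤ q := hqp.two_le
    have hqr : q ≤ n.toNat.sqrt := Nat.le_sqrt.mpr hqsq
    have hmem : ((q : Int)) ∈ (PySem.List.pyRange 2 ((n.toNat.sqrt : Int) + 1) 1).filter
        (fun p => (sieveArr n.toNat.sqrt).getD p.toNat true) := by
      rw [List.mem_filter]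
      constructor
      · rw [PySem.List.mem_pyRange_one]
        constructor
        · exact_mod_cast hq2
        · exact_mod_cast (by omega : (q : Int) < (n.toNat.sqrt : Int) + 1)
      · -- q is prime, so the sieve never marked it
        show ((sieveArr n.toNat.sqrt).getD ((q : Int)).toNat true) = true
        cases hval : (sieveArr n.toNat.sqrt).getD ((q : Int)).toNat true with
        | true => rfl
        | false =>
            exfalso
            have hcs := sieve_sound n.toNat.sqrt _ hval
            rw [Int.toNat_natCast] at hcs
            exact compShape_not_prime hcs hqp
    have := hall _ hmem
    simp only [bne_iff_ne, ne_eq] at this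
    apply this
    rw [int_mod_toNat n h0 q]
    exact_mod_cast Nat.mod_eq_zero_of_dvd hqd
  · -- no j in [2, isqrt] divides n → no sieved prime divides n
    intro hall p hp
    have hp' := (List.mem_filter.mp hp).1
    rw [PySem.List.mem_pyRange_one] at hp'
    have h2p : (2 : Int) ≤ p := hp'.1
    have hpr : p < (n.toNat.sqrt : Int) + 1 := hp'.2
    have hj : p = ((p.toNat : Nat) : Int) := by omega
    simp only [bne_iff_ne, ne_eq]
    rw [hj]
    exact hall p.toNat (by omega) (by omega)

theorem ite_bool (b : Bool) : (if b then true else false) = b := by cases b <;> rfl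

-- ===== VERDICT (by name: the statement is the Claim_ definition above) =====
theorem number_property_spec : Claim_equal_number_property := by
  intro n _
  unfold Spec_number_property number_property number_property_alt
  by_cases h1 : n < 2
  · simp only [if_pos h1, ite_bool]
    simp
  · have hflag := flag_eq n (by omega)
    rcases aTrial_cases n (n.toNat.sqrt + 1) 2 with hc | hc
    · have hb : ((PySem.List.pyRange 2 ((n.toNat.sqrt : Int) + 1) 1).filter
          (fun p => (sieveArr n.toNat.sqrt).getD p.toNat true)).all
          (fun p => n % p != 0) = true := hflag.mpr hc
      simp only [if_neg h1, hc, hb, ite_bool]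
      simp
    · have hb : ((PySem.List.pyRange 2 ((n.toNat.sqrt : Int) + 1) 1).filter
          (fun p => (sieveArr n.toNat.sqrt).getD p.toNat true)).all
          (fun p => n % p != 0) = false := by
        cases hw : ((PySem.List.pyRange 2 ((n.toNat.sqrt : Int) + 1) 1).filter
            (fun p => (sieveArr n.toNat.sqrt).getD p.toNat true)).all
            (fun p => n % p != 0)
        · rfl
        · rw [hflag.mp hw] at hc; cases hc
      simp only [if_neg h1, hc, hb, ite_bool]
      simp
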